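-- pv_equiv track=rewrite | github.com/thomasgks/printechs_wms | printechs_wms/api/item.py | _to_key
-- ===== SOURCE A (Python) =====
-- def _to_key(s: str) -> str:
--     if not s:
--         return ""
--     s = s.strip().lower()
--     out = []
--     prev_us = False
--     for ch in s:
--         if ch.isalnum():
--             out.append(ch)
--             prev_us = False
--         else:
--             if not prev_us:
--                 out.append("_")
--                 prev_us = True
--     key = "".join(out).strip("_")
--     while "__" in key:
--         key = key.replace("__", "_")
--     return key
-- ===== SOURCE B (Python) =====
-- def _to_key(s: str) -> str:
--     if not s:
--         return ""
--     s = s.strip().lower()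
--     runs = []
--     i, n = 0, len(s)
--     while i < n:
--         if s[i].isalnum():
--             j = i
--             while j < n and s[j].isalnum():
--                 j += 1
--             runs.append(s[i:j])
--             i = j
--         else:
--             i += 1
--     return "_".join(runs)
-- ===== Notes on version B (the rewrite author's own statement) =====
-- stated objective: alternative
-- what changed: Replaces the stateful char-by-char accumulator with a previous-underscore flag plus an edge strip and a collapse loop for repeated separators by a two-index tokenizer that collects the maximal alphanumeric runs and joins them with single separators, so no post-processing is needed.
import Mathlib
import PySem

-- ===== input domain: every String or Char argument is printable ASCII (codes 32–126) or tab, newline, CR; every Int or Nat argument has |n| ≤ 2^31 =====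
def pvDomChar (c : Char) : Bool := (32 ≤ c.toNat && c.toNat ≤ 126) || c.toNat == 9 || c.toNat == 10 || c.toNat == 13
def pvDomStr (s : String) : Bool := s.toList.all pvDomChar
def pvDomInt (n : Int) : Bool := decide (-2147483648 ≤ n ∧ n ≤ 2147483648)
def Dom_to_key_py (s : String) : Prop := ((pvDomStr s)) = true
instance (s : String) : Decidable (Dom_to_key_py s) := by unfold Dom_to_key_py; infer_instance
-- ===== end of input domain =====

-- B replaces A's stateful accumulator + strip('_') + '__'-collapse loop by a
-- tokenize-maximal-alnum-runs-then-join-with-'_' decomposition (alternative, same cost).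

-- ===== PORT A =====
-- A's loop body: append alnum chars; on a non-alnum char append one '_' unless the
-- previous appended char was already that '_' (prev_us flag).
def aStep (st : List Char × Bool) (ch : Char) : List Char × Bool :=
  if PySem.Chars.isalnum ch then (st.1 ++ [ch], false)
  else if st.2 then st else (st.1 ++ ['_'], true)

-- A's while-loop that collapses repeated separators, ported with a fuel bound
-- (= the key's length; each replace that fires shrinks the string, so it suffices).
def aDedup : Nat → List Char → List Char
  | 0, key => key
  | n+1, key =>
      if PySem.Chars.isIn ['_', '_'] key then
        aDedup n (PySem.Chars.replace key ['_', '_'] ['_'])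
      else key

def to_key_py (s : String) : String :=
  if PySem.Str.len s == 0 then "" else
  let t := PySem.Chars.lower (PySem.Chars.strip s.toList)
  let out := t.foldl aStep ([], false)
  let key := PySem.Chars.stripChars out.1 ['_']
  String.ofList (aDedup key.length key)

-- ===== PORT B =====
-- B's inner `while j < n and s[j].isalnum(): j += 1` + slice s[i:j]: split off the
-- maximal alphanumeric prefix of the remaining characters.
def altTakeRun : List Char → List Char × List Char
  | [] => ([], [])
  | c :: cs =>
      if PySem.Chars.isalnum c then ((altTakeRun cs).1.cons c, (altTakeRun cs).2)
      else ([], c :: cs)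

lemma altTakeRun_snd_length : ∀ cs : List Char, (altTakeRun cs).2.length ≤ cs.length := by
  intro cs
  induction cs with
  | nil => simp [altTakeRun]
  | cons c cs ih =>
      simp only [altTakeRun]
      split
      · exact Nat.le_succ_of_le ih
      · simp

-- B's outer `while i < n` scan: collect the maximal alnum runs, skip other chars.
def altRuns : List Char → List (List Char)
  | [] => []
  | c :: cs =>
      if PySem.Chars.isalnum c then
        (c :: (altTakeRun cs).1) :: altRuns (altTakeRun cs).2
      else altRuns cs
termination_by t => t.length
decreasing_by
  · exact Nat.lt_succ_of_le (altTakeRun_snd_length cs)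
  · simp

def to_key_py_alt (s : String) : String :=
  if PySem.Str.len s == 0 then "" else
  let t := PySem.Chars.lower (PySem.Chars.strip s.toList)
  String.ofList (PySem.Chars.join ['_'] (altRuns t))

-- ===== PRECONDITION & SPEC =====
def Spec_to_key_py (s : String) (out : String) : Prop := out = to_key_py_alt s
instance (s : String) (out : String) : Decidable (Spec_to_key_py s out) := by unfold Spec_to_key_py; infer_instance

-- ===== CLAIM (what is proved, stated in full; the proofs are below) =====
def Claim_equal_to_key_py : Prop := ∀ (s : String), Dom_to_key_py s → Spec_to_key_py s (to_key_py s)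

-- ===== LEMMAS AND PROOFS =====

-- The collapsed string A's loop produces from state flag p (out grows by gA p t).
def gA : Bool → List Char → List Char
  | _, [] => []
  | p, c :: cs =>
      if PySem.Chars.isalnum c then c :: gA false cs
      else if p then gA true cs else '_' :: gA true cs

def keyOf (t : List Char) : List Char := PySem.Chars.join ['_'] (altRuns t)

-- the (at most one) trailing underscore A's loop leaves before strip('_')
def tailOf (t : List Char) : List Char :=
  if PySem.Chars.isalnum (t.getLastD 'a') then [] else ['_']

lemma contains_underscore_eq :
    (fun c => (['_'] : List Char).contains c) = (fun c => c == '_') := by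
  funext c; by_cases h : c = '_' <;> simp [h]

lemma foldl_aStep_fst : ∀ (t acc : List Char) (p : Bool),
    (t.foldl aStep (acc, p)).1 = acc ++ gA p t := by
  intro t
  induction t with
  | nil => intro acc p; simp [gA]
  | cons c cs ih =>
      intro acc p
      by_cases h : PySem.Chars.isalnum c = true
      · simp [aStep, h, gA, ih]
      · cases p <;> simp [aStep, h, gA, ih]

lemma gA_true_eq : ∀ cs : List Char,
    gA true cs = gA false (cs.dropWhile (fun c => !PySem.Chars.isalnum c)) := by
  intro cs
  induction cs with
  | nil => simp [gA]
  | cons c cs ih =>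
      by_cases h : PySem.Chars.isalnum c = true
      · simp [gA, h, List.dropWhile]
      · simp [gA, h, List.dropWhile, ih]

lemma altRuns_dropWhile : ∀ cs : List Char,
    altRuns (cs.dropWhile (fun c => !PySem.Chars.isalnum c)) = altRuns cs := by
  intro cs
  induction cs with
  | nil => simp
  | cons c cs ih =>
      by_cases h : PySem.Chars.isalnum c = true
      · simp [List.dropWhile, h]
      · simp [List.dropWhile, h, ih, altRuns]

lemma atr_spec : ∀ cs : List Char, (altTakeRun cs).1 ++ (altTakeRun cs).2 = cs := by
  intro cs
  induction cs with
  | nil => simp [altTakeRun]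
  | cons c cs ih =>
      by_cases h : PySem.Chars.isalnum c = true <;> simp [altTakeRun, h, ih]

lemma atr_all : ∀ cs : List Char, ∀ c ∈ (altTakeRun cs).1, PySem.Chars.isalnum c = true := by
  intro cs
  induction cs with
  | nil => simp [altTakeRun]
  | cons c cs ih =>
      by_cases h : PySem.Chars.isalnum c = true
      · intro x hx
        simp [altTakeRun, h] at hx
        rcases hx with hx | hx
        · subst hx; exact h
        · exact ih x hx
      · simp [altTakeRun, h]

lemma atr_rest : ∀ (cs : List Char) d ds,
    (altTakeRun cs).2 = d :: ds → PySem.Chars.isalnum d = false := by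
  intro cs
  induction cs with
  | nil => intro d ds h; simp [altTakeRun] at h
  | cons c cs ih =>
      intro d ds h
      by_cases hc : PySem.Chars.isalnum c = true
      · simp [altTakeRun, hc] at h
        exact ih d ds h
      · simp [altTakeRun, hc] at h
        rcases h with ⟨h1, h2⟩
        subst h1
        simpa using hc

lemma gA_false_append : ∀ (r rest : List Char),
    (∀ c ∈ r, PySem.Chars.isalnum c = true) →
    gA false (r ++ rest) = r ++ gA false rest := by
  intro r
  induction r with
  | nil => intro rest h; simp
  | cons c r ih =>
      intro rest h
      have hc : PySem.Chars.isalnum c = true := h c (by simp)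
      simp [gA, hc]
      exact ih rest (fun x hx => h x (by simp [hx]))

lemma dropWhile_head : ∀ (l : List Char) c l',
    l.dropWhile (fun c => !PySem.Chars.isalnum c) = c :: l' →
    PySem.Chars.isalnum c = true := by
  intro l
  induction l with
  | nil => intro c l' h; simp at h
  | cons x l ih =>
      intro c l' h
      by_cases hx : PySem.Chars.isalnum x = true
      · simp [List.dropWhile, hx] at h
        rcases h with ⟨h1, _⟩; subst h1; exact hx
      · simp [List.dropWhile, hx] at h
        exact ih c l' h

lemma lastD_true (P : Char → Bool) : ∀ (l : List Char) (c d : Char),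
    P c = true → (∀ x ∈ l, P x = true) → P ((c :: l).getLastD d) = true := by
  intro l
  induction l with
  | nil => intro c d hc _; simpa using hc
  | cons x l ih =>
      intro c d hc h
      have := ih x d (h x (by simp)) (fun y hy => h y (by simp [hy]))
      simpa using this

lemma gA_head_stop : ∀ t : List Char,
    (t = [] ∨ PySem.Chars.isalnum t.headI = true) →
    List.dropWhile (fun c => c == '_') (gA false t) = gA false t := by
  intro t h
  rcases h with h | h
  · subst h; simp [gA]
  · cases t with
    | nil => simp [gA]
    | cons c cs =>
        simp at h
        have hne : (c == '_') = false := by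
          have hcc : c ≠ '_' := by intro hc; subst hc; exact absurd h (by decide)
          simpa using hcc
        simp [gA, h, hne]

lemma dropUnderscore_gA : ∀ t : List Char,
    List.dropWhile (fun c => c == '_') (gA false t)
      = gA false (t.dropWhile (fun c => !PySem.Chars.isalnum c)) := by
  intro t
  cases t with
  | nil => simp [gA]
  | cons c cs =>
      by_cases h : PySem.Chars.isalnum c = true
      · rw [gA_head_stop (c :: cs) (Or.inr (by simpa using h))]
        simp [List.dropWhile, h]
      · have hstop : List.dropWhile (fun c => c == '_')
            (gA false (cs.dropWhile (fun c => !PySem.Chars.isalnum c)))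
            = gA false (cs.dropWhile (fun c => !PySem.Chars.isalnum c)) := by
          apply gA_head_stop
          cases hd : cs.dropWhile (fun c => !PySem.Chars.isalnum c) with
          | nil => exact Or.inl rfl
          | cons e es => exact Or.inr (by simpa using dropWhile_head cs e es hd)
        simp [gA, h, List.dropWhile, gA_true_eq, hstop]

lemma altRuns_runs : ∀ (n : Nat) (t : List Char), t.length ≤ n →
    ∀ r ∈ altRuns t, r ≠ [] ∧ ∀ c ∈ r, PySem.Chars.isalnum c = true := by
  intro n
  induction n with
  | zero =>
      intro t ht
      have : t = [] := List.eq_nil_of_length_eq_zero (Nat.le_zero.mp ht)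
      subst this; simp [altRuns]
  | succ n ih =>
      intro t ht r hr
      cases t with
      | nil => simp [altRuns] at hr
      | cons c cs =>
          by_cases hc : PySem.Chars.isalnum c = true
          · simp [altRuns, hc] at hr
            rcases hr with hr | hr
            · subst hr
              refine ⟨by simp, ?_⟩
              intro x hx
              rcases List.mem_cons.mp hx with hx | hx
              · subst hx; exact hc
              · exact atr_all cs x hx
            · exact ih (altTakeRun cs).2
                (le_trans (altTakeRun_snd_length cs) (by simpa using Nat.le_of_succ_le_succ ht)) r hr
          · simp [altRuns, hc] at hr
            exact ih cs (by simpa using Nat.le_of_succ_le_succ ht) r hr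

lemma infix_unders_append : ∀ (r : List Char) (p l : List Char),
    (∀ c ∈ r, PySem.Chars.isalnum c = true) →
    ('_' :: p) <:+: (r ++ l) → ('_' :: p) <:+: l := by
  intro r
  induction r with
  | nil => intro p l _ h; simpa using h
  | cons x r ih =>
      intro p l hall h
      obtain ⟨u, v, huv⟩ := h
      cases u with
      | nil =>
          simp at huv
          have hx := hall x (by simp)
          rw [← huv.1] at hx
          exact absurd hx (by decide)
      | cons y u' =>
          have : u' ++ ('_' :: p) ++ v = r ++ l := by
            have := congrArg List.tail huv
            simpa using this
          exact ih p l (fun c hc => hall c (by simp [hc])) ⟨u', v, this⟩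

lemma join_head : ∀ rs : List (List Char),
    (∀ r ∈ rs, r ≠ [] ∧ ∀ c ∈ r, PySem.Chars.isalnum c = true) → rs ≠ [] →
    ∃ x l', PySem.Chars.join ['_'] rs = x :: l' ∧ PySem.Chars.isalnum x = true := by
  intro rs h hne
  cases rs with
  | nil => exact absurd rfl hne
  | cons r rs =>
      obtain ⟨hr, hall⟩ := h r (by simp)
      cases hx : r with
      | nil => exact absurd hx hr
      | cons x xs =>
          subst hx
          have hxa : PySem.Chars.isalnum x = true := hall x (by simp)
          cases rs with
          | nil => exact ⟨x, xs, by simp [PySem.Chars.join_singleton], hxa⟩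
          | cons r2 rs =>
              refine ⟨x, xs ++ ['_'] ++ PySem.Chars.join ['_'] (r2 :: rs), ?_, hxa⟩
              rw [PySem.Chars.join_cons_cons]
              simp

lemma join_noDD : ∀ rs : List (List Char),
    (∀ r ∈ rs, r ≠ [] ∧ ∀ c ∈ r, PySem.Chars.isalnum c = true) →
    PySem.Chars.isIn ['_', '_'] (PySem.Chars.join ['_'] rs) = false := by
  intro rs
  induction rs with
  | nil =>
      intro _
      rw [PySem.Chars.isIn_eq_false_iff]
      simp [PySem.Chars.join_nil]
  | cons r rs ih =>
      intro h
      rw [PySem.Chars.isIn_eq_false_iff]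
      intro hinf
      obtain ⟨hr, hall⟩ := h r (by simp)
      cases rs with
      | nil =>
          rw [PySem.Chars.join_singleton] at hinf
          have hm : ('_' : Char) ∈ r := hinf.subset (by simp)
          exact absurd (hall '_' hm) (by decide)
      | cons r2 rs =>
          rw [PySem.Chars.join_cons_cons] at hinf
          have hinf2 : ['_', '_'] <:+: ('_' :: PySem.Chars.join ['_'] (r2 :: rs)) := by
            have := infix_unders_append r ['_'] (['_'] ++ PySem.Chars.join ['_'] (r2 :: rs)) hall
              (by simpa [List.append_assoc] using hinf)
            simpa using this
          obtain ⟨u, v, huv⟩ := hinf2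
          obtain ⟨x, l', hx, hxa⟩ := join_head (r2 :: rs)
            (fun q hq => h q (by simp [hq])) (by simp)
          cases u with
          | nil =>
              simp [hx] at huv
              rw [← huv.1] at hxa
              exact absurd hxa (by decide)
          | cons y u' =>
              have hJ : ['_', '_'] <:+: PySem.Chars.join ['_'] (r2 :: rs) := by
                refine ⟨u', v, ?_⟩
                have := congrArg List.tail huv
                simpa using this
              have := ih (fun q hq => h q (by simp [hq]))
              rw [PySem.Chars.isIn_eq_false_iff] at this
              exact this hJ

lemma join_last : ∀ rs : List (List Char),
    (∀ r ∈ rs, r ≠ [] ∧ ∀ c ∈ r, PySem.Chars.isalnum c = true) →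
    ∀ c, (PySem.Chars.join ['_'] rs).getLast? = some c → PySem.Chars.isalnum c = true := by
  intro rs
  induction rs with
  | nil => intro _ c hc; simp [PySem.Chars.join_nil] at hc
  | cons r rs ih =>
      intro h c hc
      obtain ⟨hr, hall⟩ := h r (by simp)
      cases rs with
      | nil =>
          rw [PySem.Chars.join_singleton] at hc
          cases hx : r with
          | nil => exact absurd hx hr
          | cons x xs =>
              subst hx
              have := lastD_true PySem.Chars.isalnum xs x 'a' (hall x (by simp))
                (fun y hy => hall y (by simp [hy]))
              rw [List.getLastD_eq_getLast?, hc] at this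
              simpa using this
      | cons r2 rs =>
          rw [PySem.Chars.join_cons_cons] at hc
          obtain ⟨x, l', hx, _⟩ := join_head (r2 :: rs) (fun q hq => h q (by simp [hq])) (by simp)
          rw [List.getLast?_append, List.getLast?_append, hx] at hc
          have hsome : (x :: l').getLast? = some ((x :: l').getLast (by simp)) :=
            List.getLast?_eq_some_getLast (by simp)
          rw [hsome] at hc
          simp at hc
          apply ih (fun q hq => h q (by simp [hq])) c
          rw [hx, hsome]
          simpa using hc

lemma getLast?_append_right (u v : List Char) (hv : v ≠ []) :
    (u ++ v).getLast? = v.getLast? := by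
  rw [List.getLast?_append]
  cases hl : v.getLast? with
  | none => exact absurd (List.getLast?_eq_none_iff.mp hl) hv
  | some x => rfl

lemma gA_main : ∀ (n : Nat) (t : List Char), t.length ≤ n →
    (t = [] ∨ PySem.Chars.isalnum t.headI = true) →
    gA false t = keyOf t ++ tailOf t := by
  intro n
  induction n with
  | zero =>
      intro t ht _
      have : t = [] := List.eq_nil_of_length_eq_zero (Nat.le_zero.mp ht)
      subst this
      simp [gA, keyOf, altRuns, PySem.Chars.join_nil, tailOf]
      decide
  | succ n ih =>
      intro t ht hh
      rcases hh with hh | hh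
      · subst hh
        simp [gA, keyOf, altRuns, PySem.Chars.join_nil, tailOf]
        decide
      · cases t with
        | nil => simp [gA, keyOf, altRuns, PySem.Chars.join_nil, tailOf]; decide
        | cons c cs =>
            simp at hh
            obtain ⟨r, rest, hatr⟩ : ∃ r rest, altTakeRun cs = (r, rest) := ⟨_, _, rfl⟩
            have hsplit : r ++ rest = cs := by
              have := atr_spec cs; rw [hatr] at this; simpa using this
            have hrall : ∀ x ∈ r, PySem.Chars.isalnum x = true := by
              intro x hx; have := atr_all cs x; rw [hatr] at this; exact this hx
            have hAR : altRuns (c :: cs) = (c :: r) :: altRuns rest := by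
              simp [altRuns, hh, hatr]
            have h1 : gA false (c :: cs) = c :: (r ++ gA false rest) := by
              rw [← hsplit]
              simp only [gA, hh, if_pos]
              rw [gA_false_append r rest hrall]
            cases hrest2 : rest with
            | nil =>
                have hcs : cs = r := by rw [← hsplit, hrest2]; simp
                have hkey : keyOf (c :: cs) = c :: r := by
                  unfold keyOf
                  rw [hAR, hrest2]
                  simp [altRuns, PySem.Chars.join_singleton]
                have htail : tailOf (c :: cs) = [] := by
                  unfold tailOf
                  have hl : PySem.Chars.isalnum ((c :: cs).getLastD 'a') = true := by
                    rw [hcs]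
                    exact lastD_true _ r c 'a' hh hrall
                  simp only [List.getLastD_eq_getLast?] at hl
                  simp [hl]
                rw [h1, hrest2, hkey, htail]
                simp [gA]
            | cons d ds =>
                have hd : PySem.Chars.isalnum d = false :=
                  atr_rest cs d ds (by rw [hatr]; simpa using hrest2)
                have h2 : gA false rest
                    = '_' :: gA false (ds.dropWhile (fun c => !PySem.Chars.isalnum c)) := by
                  rw [hrest2]
                  simp [gA, hd, gA_true_eq]
                have hARrest : altRuns rest
                    = altRuns (ds.dropWhile (fun c => !PySem.Chars.isalnum c)) := by
                  rw [hrest2]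
                  simp [altRuns, hd, altRuns_dropWhile]
                have hlen : (ds.dropWhile (fun c => !PySem.Chars.isalnum c)).length ≤ n := by
                  have h3 : (List.dropWhile (fun c => !PySem.Chars.isalnum c) ds).length ≤ ds.length :=
                    List.length_dropWhile_le _ _
                  have h4 : cs.length = r.length + (d :: ds).length := by
                    rw [← hsplit, hrest2]; simp
                  simp at ht h4
                  omega
                cases hds0 : ds.dropWhile (fun c => !PySem.Chars.isalnum c) with
                | nil =>
                    have hkey : keyOf (c :: cs) = c :: r := by
                      unfold keyOf
                      rw [hAR, hARrest, hds0]
                      simp [altRuns, PySem.Chars.join_singleton]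
                    have hall_ds : ∀ x ∈ ds, (!PySem.Chars.isalnum x) = true :=
                      List.dropWhile_eq_nil_iff.mp hds0
                    have htail : tailOf (c :: cs) = ['_'] := by
                      unfold tailOf
                      have hshape : c :: cs = (c :: r) ++ (d :: ds) := by
                        rw [← hsplit, hrest2]; simp
                      have hlast : (c :: cs).getLast? = (d :: ds).getLast? := by
                        rw [hshape]
                        exact getLast?_append_right _ _ (by simp)
                      have hP : (fun x => !PySem.Chars.isalnum x) ((d :: ds).getLastD 'a') = true :=
                        lastD_true _ ds d 'a' (by simp [hd]) hall_ds
                      have hfin : PySem.Chars.isalnum ((c :: cs).getLastD 'a') = false := by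
                        rw [List.getLastD_eq_getLast?, hlast, ← List.getLastD_eq_getLast?]
                        simpa using hP
                      simp only [List.getLastD_eq_getLast?] at hfin
                      simp [hfin]
                    rw [h1, h2, hds0, hkey, htail]
                    simp [gA]
                | cons e es =>
                    have he : PySem.Chars.isalnum e = true := dropWhile_head ds e es hds0
                    have hmain := ih (ds.dropWhile (fun c => !PySem.Chars.isalnum c)) hlen
                      (Or.inr (by rw [hds0]; simpa using he))
                    have hARds : altRuns (ds.dropWhile (fun c => !PySem.Chars.isalnum c))
                        = (e :: (altTakeRun es).1) :: altRuns (altTakeRun es).2 := by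
                      rw [hds0]; simp [altRuns, he]
                    have hkey : keyOf (c :: cs)
                        = (c :: r) ++ ['_'] ++ keyOf (ds.dropWhile (fun c => !PySem.Chars.isalnum c)) := by
                      unfold keyOf
                      rw [hAR, hARrest, hARds, PySem.Chars.join_cons_cons, ← hARds]
                    have htail : tailOf (c :: cs)
                        = tailOf (ds.dropWhile (fun c => !PySem.Chars.isalnum c)) := by
                      have hds : ds = ds.takeWhile (fun c => !PySem.Chars.isalnum c)
                          ++ ds.dropWhile (fun c => !PySem.Chars.isalnum c) :=
                        List.takeWhile_append_dropWhile.symm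
                      have hshape : c :: cs
                          = ((c :: r) ++ (d :: ds.takeWhile (fun c => !PySem.Chars.isalnum c)))
                            ++ ds.dropWhile (fun c => !PySem.Chars.isalnum c) := by
                        rw [← hsplit, hrest2]
                        conv_lhs => rw [hds]
                        simp
                      unfold tailOf
                      rw [List.getLastD_eq_getLast?, List.getLastD_eq_getLast?, hshape,
                        getLast?_append_right _ _ (by rw [hds0]; simp)]
                    rw [h1, h2, hmain, hkey, htail]
                    simp

lemma aDedup_id : ∀ (n : Nat) (key : List Char),
    PySem.Chars.isIn ['_', '_'] key = false → aDedup n key = key := by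
  intro n key h
  cases n with
  | zero => rfl
  | succ n => simp [aDedup, h]

lemma rstrip_key (t' : List Char) :
    List.dropWhile (fun c => c == '_') (keyOf t').reverse = (keyOf t').reverse := by
  cases hrev : (keyOf t').reverse with
  | nil => simp
  | cons c l' =>
      have hlast : (keyOf t').getLast? = some c := by
        rw [← List.head?_reverse, hrev]; rfl
      have hc : PySem.Chars.isalnum c = true := by
        apply join_last (altRuns t') (altRuns_runs t'.length t' le_rfl) c
        unfold keyOf at hlast
        exact hlast
      have hne : (c == '_') = false := by
        have : c ≠ '_' := fun h => by subst h; exact absurd hc (by decide)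
        simpa using this
      simp [hne]

lemma core_eq (t : List Char) :
    aDedup (PySem.Chars.stripChars (t.foldl aStep ([], false)).1 ['_']).length
        (PySem.Chars.stripChars (t.foldl aStep ([], false)).1 ['_'])
      = PySem.Chars.join ['_'] (altRuns t) := by
  have hfold : (t.foldl aStep ([], false)).1 = gA false t := by
    simpa using foldl_aStep_fst t [] false
  have hhead : t.dropWhile (fun c => !PySem.Chars.isalnum c) = []
      ∨ PySem.Chars.isalnum (t.dropWhile (fun c => !PySem.Chars.isalnum c)).headI = true := by
    cases hd : t.dropWhile (fun c => !PySem.Chars.isalnum c) with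
    | nil => exact Or.inl rfl
    | cons e es => exact Or.inr (by simpa using dropWhile_head t e es hd)
  have hruns := altRuns_runs (t.dropWhile (fun c => !PySem.Chars.isalnum c)).length
    (t.dropWhile (fun c => !PySem.Chars.isalnum c)) le_rfl
  have hmain := gA_main (t.dropWhile (fun c => !PySem.Chars.isalnum c)).length
    (t.dropWhile (fun c => !PySem.Chars.isalnum c)) le_rfl hhead
  have hstrip : PySem.Chars.stripChars (t.foldl aStep ([], false)).1 ['_']
      = keyOf (t.dropWhile (fun c => !PySem.Chars.isalnum c)) := by
    rw [hfold]
    unfold PySem.Chars.stripChars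
    rw [contains_underscore_eq]
    show (List.dropWhile (fun c => c == '_')
        (List.dropWhile (fun c => c == '_') (gA false t)).reverse).reverse
      = keyOf (List.dropWhile (fun c => !PySem.Chars.isalnum c) t)
    rw [dropUnderscore_gA, hmain, List.reverse_append]
    unfold tailOf at *
    by_cases hlast : PySem.Chars.isalnum
        ((t.dropWhile (fun c => !PySem.Chars.isalnum c)).getLastD 'a') = true
    · simp only [hlast, if_true, List.reverse_nil, List.nil_append]
      rw [rstrip_key, List.reverse_reverse]
    · simp only [hlast, if_false, Bool.false_eq_true]
      have : List.dropWhile (fun c => c == '_')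
          ((['_'] : List Char).reverse ++ (keyOf (t.dropWhile (fun c => !PySem.Chars.isalnum c))).reverse)
          = List.dropWhile (fun c => c == '_')
            (keyOf (t.dropWhile (fun c => !PySem.Chars.isalnum c))).reverse := by
        simp
      rw [this, rstrip_key, List.reverse_reverse]
  rw [hstrip, aDedup_id]
  · unfold keyOf
    rw [altRuns_dropWhile]
  · unfold keyOf
    exact join_noDD _ hruns

-- ===== VERDICT (by name: the statement is the Claim_ definition above) =====
theorem to_key_py_spec : Claim_equal_to_key_py := by
  unfold Claim_equal_to_key_py Spec_to_key_py
  intro s _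
  unfold to_key_py to_key_py_alt
  by_cases h0 : (PySem.Str.len s == 0) = true
  · simp only [h0, if_true]
  · simp only [h0, if_false, Bool.false_eq_true]
    rw [core_eq]
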